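-- pv_equiv track=rewrite | github.com/PietroPasotti/relation-wrapper | relation.py | get_worst_case
-- ===== SOURCE A (Python) =====
-- from typing import (
--     Any,
--     Callable,
--     Dict,
--     Generic,
--     Iterable,
--     Mapping,
--     Optional,
--     Tuple,
--     Type,
--     TypeVar,
--     Union,
-- )
--
-- def get_worst_case(validity: Iterable[Optional[bool]]) -> Optional[bool]:
--     """Get the worst of (from bad to worse): True, None, False."""
--     out = True
--     for value in validity:
--         if value is None and out is True:  # True --> None
--             out = value
--         if value is False and out in {None, True}:  # {None/True} --> False
--             out = value
--     return out
-- ===== SOURCE B (Python) =====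
-- def get_worst_case(validity):
--     """Get the worst of (from bad to worse): True, None, False."""
--     values = list(validity)
--     if any(v is False for v in values):
--         return False
--     if any(v is None for v in values):
--         return None
--     return True
-- ===== Notes on version B (the rewrite author's own statement) =====
-- stated objective: simpler
-- what changed: Replaces A's single stateful pass threading a running 'out' through ordering branches with a materialize-then-probe decomposition (any False -> False, else any None -> None, else True); the short-circuiting any() scans beat A's per-element branch bookkeeping.
import Mathlib
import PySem

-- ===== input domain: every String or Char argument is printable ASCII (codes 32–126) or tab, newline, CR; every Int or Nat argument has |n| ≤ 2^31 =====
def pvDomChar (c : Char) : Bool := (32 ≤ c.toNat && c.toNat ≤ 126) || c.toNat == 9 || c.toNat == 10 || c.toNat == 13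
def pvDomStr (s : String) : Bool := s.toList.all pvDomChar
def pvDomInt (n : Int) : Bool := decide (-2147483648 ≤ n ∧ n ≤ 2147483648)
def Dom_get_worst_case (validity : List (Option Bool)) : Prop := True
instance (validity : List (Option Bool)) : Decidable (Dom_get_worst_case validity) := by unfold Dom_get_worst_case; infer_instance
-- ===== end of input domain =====

-- ===== PORT A =====
-- A: single pass threading a running `out` through ordering branches
def get_worst_case (validity : List (Option Bool)) : Option Bool :=
  validity.foldl (fun out value =>
    let out := if value = none ∧ out = some true then value else out
    if value = some false ∧ (out = none ∨ out = some true) then value else out)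
    (some true)

-- ===== PORT B =====
-- B: materialize then probe in priority order (simpler decomposition)
def get_worst_case_alt (validity : List (Option Bool)) : Option Bool :=
  if validity.any (· == some false) then some false
  else if validity.any (· == none) then none
  else some true

-- ===== PRECONDITION & SPEC =====
def Spec_get_worst_case (validity : List (Option Bool)) (out : Option Bool) : Prop := out = get_worst_case_alt validity
instance (validity : List (Option Bool)) (out : Option Bool) : Decidable (Spec_get_worst_case validity out) := by unfold Spec_get_worst_case; infer_instance

-- ===== CLAIM (what is proved, stated in full; the proofs are below) =====
def Claim_equal_get_worst_case : Prop := ∀ (validity : List (Option Bool)), Dom_get_worst_case validity → Spec_get_worst_case validity (get_worst_case validity)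

-- ===== LEMMAS AND PROOFS =====

-- ===== VERDICT (by name: the statement is the Claim_ definition above) =====
theorem foldl_step (validity : List (Option Bool)) (out : Option Bool) :
    validity.foldl (fun out value =>
      let out := if value = none ∧ out = some true then value else out
      if value = some false ∧ (out = none ∨ out = some true) then value else out) out =
    if out = some false ∨ validity.any (· == some false) then some false
    else if out = none ∨ validity.any (· == none) then none
    else out := by
  induction validity generalizing out with
  | nil => rcases out with _ | (_|_) <;> simp
  | cons v vs ih =>
    simp only [List.foldl_cons, List.any_cons, ih]
    rcases v with _ | b
    · rcases out with _ | b' <;> simp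
      rcases b' with _ | _ <;> simp
    · rcases b <;> rcases out with _ | (_|_) <;> simp

theorem get_worst_case_spec : Claim_equal_get_worst_case := by
  intro validity _
  unfold Spec_get_worst_case get_worst_case get_worst_case_alt
  rw [foldl_step]
  simp
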